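-- pv_equiv track=rewrite | github.com/Isaac-McPadden/Farkle_II | src/farkle/analysis/reporting.py | _s_tiers_section
-- ===== SOURCE A (Python) =====
-- from typing import Iterable, Mapping, Sequence, SupportsFloat, cast
--
-- def _s_tiers_section(s_tiers: Mapping[str, str]) -> list[str]:
--     """Render the S+/S/S- breakdown for head-to-head candidates."""
--     if not s_tiers:
--         return []
--     buckets: dict[str, list[str]] = {"S+": [], "S": [], "S-": []}
--     for strategy, label in s_tiers.items():
--         if label in buckets:
--             buckets[label].append(strategy)
--     lines = ["### Head-to-head S-tier breakdown"]
--     for label in ("S+", "S", "S-"):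
--         strategies = sorted(buckets[label])
--         if not strategies:
--             continue
--         lines.append(f"- {label}: {', '.join(strategies)}")
--     return lines
-- ===== SOURCE B (Python) =====
-- def _s_tiers_section(s_tiers):
--     """Render the S+/S/S- breakdown for head-to-head candidates."""
--     if not s_tiers:
--         return []
--     lines = ["### Head-to-head S-tier breakdown"]
--     for label in ("S+", "S", "S-"):
--         strategies = sorted(s for s, l in s_tiers.items() if l == label)
--         if strategies:
--             lines.append(f"- {label}: {', '.join(strategies)}")
--     return lines
-- ===== Notes on version B (the rewrite author's own statement) =====
-- stated objective: simpler
-- what changed: Drops the intermediate buckets dict and its populating loop; a single loop over the fixed label tuple filters and sorts the mapping's items per label directly.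
import Mathlib
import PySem

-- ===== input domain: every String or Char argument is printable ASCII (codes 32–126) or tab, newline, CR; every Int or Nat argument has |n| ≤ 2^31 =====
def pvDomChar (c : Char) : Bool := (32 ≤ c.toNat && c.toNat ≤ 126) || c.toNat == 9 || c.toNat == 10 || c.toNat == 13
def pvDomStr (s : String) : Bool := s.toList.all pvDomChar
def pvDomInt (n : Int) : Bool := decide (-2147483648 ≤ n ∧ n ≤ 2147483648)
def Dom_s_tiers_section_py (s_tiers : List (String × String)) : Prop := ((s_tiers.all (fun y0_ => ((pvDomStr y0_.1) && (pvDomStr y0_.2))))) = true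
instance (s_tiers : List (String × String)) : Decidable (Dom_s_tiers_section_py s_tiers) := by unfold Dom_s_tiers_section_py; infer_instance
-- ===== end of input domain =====

-- B removes A's intermediate buckets dict and its populating loop, filtering+sorting the
-- mapping's items per label in one rendering loop; objective: simpler.

-- ===== PORT A =====
def s_tiers_section_py (s_tiers : List (String × String)) : List String :=
  let d := PySem.Dict.ofList s_tiers
  if d.items = [] then []
  else
    let buckets : PySem.Dict String (List String) :=
      PySem.Dict.ofList [("S+", []), ("S", []), ("S-", [])]
    let buckets := d.items.foldl
      (fun b (p : String × String) =>
        if b.contains p.2 then b.modify p.2 [] (fun xs => xs ++ [p.1]) else b) buckets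
    ["S+", "S", "S-"].foldl
      (fun lines label =>
        let strategies := PySem.List.sorted (buckets.getD label []) (fun s => s) false
        if strategies = [] then lines
        else lines ++ ["- " ++ label ++ ": " ++ PySem.Str.join ", " strategies])
      ["### Head-to-head S-tier breakdown"]

-- ===== PORT B =====
def s_tiers_section_py_alt (s_tiers : List (String × String)) : List String :=
  let d := PySem.Dict.ofList s_tiers
  if d.items = [] then []
  else
    ["S+", "S", "S-"].foldl
      (fun lines label =>
        let strategies := PySem.List.sorted
          ((d.items.filter (fun (p : String × String) => p.2 == label)).map (·.1))
          (fun s => s) false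
        if strategies = [] then lines
        else lines ++ ["- " ++ label ++ ": " ++ PySem.Str.join ", " strategies])
      ["### Head-to-head S-tier breakdown"]

-- ===== PRECONDITION & SPEC =====
def Spec_s_tiers_section_py (s_tiers : List (String × String)) (out : List String) : Prop := out = s_tiers_section_py_alt s_tiers
instance (s_tiers : List (String × String)) (out : List String) : Decidable (Spec_s_tiers_section_py s_tiers out) := by unfold Spec_s_tiers_section_py; infer_instance

-- ===== CLAIM (what is proved, stated in full; the proofs are below) =====
def Claim_equal_s_tiers_section_py : Prop := ∀ (s_tiers : List (String × String)), Dom_s_tiers_section_py s_tiers → Spec_s_tiers_section_py s_tiers (s_tiers_section_py s_tiers)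

-- ===== LEMMAS AND PROOFS =====

-- A's guarded bucket-populating loop, read off at a key the start dict contains.
lemma foldA_getD (c : String) :
    ∀ (l : List (String × String)) (b : PySem.Dict String (List String)),
      b.contains c = true →
      (l.foldl (fun b (p : String × String) =>
          if b.contains p.2 then b.modify p.2 [] (fun xs => xs ++ [p.1]) else b) b).getD c []
        = b.getD c [] ++ ((l.filter (fun p => b.contains p.2 && (p.2 == c))).map (·.1)) := by
  intro l
  induction l with
  | nil => intro b _; simp
  | cons p t ih =>
    intro b hc
    by_cases hp : b.contains p.2 = true
    · have hc' : (b.modify p.2 [] (fun xs => xs ++ [p.1])).contains c = true := by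
        simp [PySem.Dict.contains_modify, hc]
      have hcong : ∀ q ∈ t,
          ((b.modify p.2 [] (fun xs => xs ++ [p.1])).contains q.2 && (q.2 == c))
            = (b.contains q.2 && (q.2 == c)) := by
        intro q _
        by_cases h : q.2 = p.2
        · simp [PySem.Dict.contains_modify, h, hp]
        · have hb : (q.2 == p.2) = false := by simpa using h
          simp [PySem.Dict.contains_modify, hb]
      rw [List.foldl_cons, if_pos hp, ih _ hc', List.filter_congr hcong,
        PySem.Dict.getD_modify]
      by_cases hpc : p.2 = c
      · subst hpc
        simp [hp]
      · have hcp : ¬ c = p.2 := fun h => hpc h.symm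
        have hb : (p.2 == c) = false := by simpa using hpc
        simp [hb, hcp]
    · have hp' : b.contains p.2 = false := by simpa using hp
      simp [List.foldl_cons, hp', ih _ hc]

-- A's bucket for a label the initial dict contains is the label's filter of the items.
lemma bucket_eq (l : List (String × String)) (c : String)
    (hc : (PySem.Dict.ofList [("S+", ([] : List String)), ("S", []), ("S-", [])]).contains c = true)
    (hg : (PySem.Dict.ofList [("S+", ([] : List String)), ("S", []), ("S-", [])]).getD c [] = []) :
    (l.foldl (fun b (p : String × String) =>
        if b.contains p.2 then b.modify p.2 [] (fun xs => xs ++ [p.1]) else b)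
      (PySem.Dict.ofList [("S+", ([] : List String)), ("S", []), ("S-", [])])).getD c []
      = (l.filter (fun p => p.2 == c)).map (·.1) := by
  rw [foldA_getD c l _ hc, hg, List.nil_append]
  congr 1
  apply List.filter_congr
  intro q _
  by_cases h : q.2 = c
  · subst h; simp [hc]
  · have hb : (q.2 == c) = false := by simpa using h
    simp [hb]

-- ===== VERDICT (by name: the statement is the Claim_ definition above) =====
theorem s_tiers_section_py_spec : Claim_equal_s_tiers_section_py := by
  intro l _
  unfold Spec_s_tiers_section_py s_tiers_section_py s_tiers_section_py_alt
  by_cases h : (PySem.Dict.ofList l).items = []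
  · simp only [h, if_pos]
  · simp only [h, if_neg, not_false_iff, List.foldl_cons, List.foldl_nil]
    rw [bucket_eq _ "S+" (by decide) (by decide),
        bucket_eq _ "S" (by decide) (by decide),
        bucket_eq _ "S-" (by decide) (by decide)]
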